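-- pv_equiv track=rewrite | github.com/lucrysta/Proofpoint | Multi Threaded.py | define_topic
-- ===== SOURCE A (Python) =====
-- from collections import defaultdict
--
-- def define_topic(body):
--     # Split the body and create a dictionary
--     wordCounts = defaultdict(int)
--     words = body.split(' ')
--
--     # Go through body and count words related to topics
--     for word in words:
--         wordCounts[word] += 1
--
--     # Add up counts
--     trump_count = wordCounts['Trump'] + wordCounts['president'] + wordCounts['President'] + wordCounts['Pence'] + \
--                   wordCounts['Mike'] + wordCounts['GOP'] + wordCounts['Republican'] + wordCounts['Republicans'] + \
--                   wordCounts['Donald'] + wordCounts['Mitch'] + wordCounts['McConnell'] + wordCounts['right'] + \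
--                   wordCounts['Barrett']
--     biden_count = wordCounts['Biden'] + wordCounts['Kamala'] + wordCounts['Vice President'] + wordCounts['Joe'] + \
--                   wordCounts['Harris'] + wordCounts['DNC'] + wordCounts['Democrat'] + wordCounts['Democrats'] + \
--                   wordCounts['Barack'] + wordCounts['Obama'] + wordCounts['Nancy'] + wordCounts['Pelosi'] + wordCounts[
--                       'left'] + wordCounts['Schumer'] + wordCounts['Pete'] + wordCounts['Buttigieg']
--
--     # Determine topic
--     if trump_count > biden_count:
--         keyword = 'Trump'
--     elif biden_count > trump_count:
--         keyword = 'Biden'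
--     else:
--         keyword = 'Undefined'
--     return keyword
-- ===== SOURCE B (Python) =====
-- TRUMP_WORDS = frozenset(['Trump', 'president', 'President', 'Pence', 'Mike', 'GOP',
--                          'Republican', 'Republicans', 'Donald', 'Mitch', 'McConnell',
--                          'right', 'Barrett'])
-- BIDEN_WORDS = frozenset(['Biden', 'Kamala', 'Vice President', 'Joe', 'Harris', 'DNC',
--                          'Democrat', 'Democrats', 'Barack', 'Obama', 'Nancy', 'Pelosi',
--                          'left', 'Schumer', 'Pete', 'Buttigieg'])
--
--
-- def define_topic(body):
--     trump_count = 0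
--     biden_count = 0
--     for word in body.split(' '):
--         if word in TRUMP_WORDS:
--             trump_count += 1
--         elif word in BIDEN_WORDS:
--             biden_count += 1
--     if trump_count > biden_count:
--         return 'Trump'
--     if biden_count > trump_count:
--         return 'Biden'
--     return 'Undefined'
-- ===== Notes on version B (the rewrite author's own statement) =====
-- stated objective: simpler
-- what changed: Replaces the word-histogram dict plus a second 29-term lookup-summation pass with a single pass over the split words that keeps just two integer counters via set membership.
import Mathlib
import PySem

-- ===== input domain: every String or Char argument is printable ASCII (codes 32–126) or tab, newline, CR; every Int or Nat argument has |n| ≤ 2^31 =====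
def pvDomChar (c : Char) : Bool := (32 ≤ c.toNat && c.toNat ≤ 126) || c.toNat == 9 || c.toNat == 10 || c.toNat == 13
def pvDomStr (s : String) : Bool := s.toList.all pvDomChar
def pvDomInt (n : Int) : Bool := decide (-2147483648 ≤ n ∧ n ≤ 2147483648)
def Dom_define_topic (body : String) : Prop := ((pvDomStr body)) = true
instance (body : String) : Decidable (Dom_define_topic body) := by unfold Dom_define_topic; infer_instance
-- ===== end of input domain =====

-- B replaces A's word-histogram dict and its 29-term lookup-summation pass with one pass
-- keeping two integer counters via set membership (objective: simpler).

-- ===== PORT A =====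
-- body.split(' '): the separator is the nonempty literal " ", so split? is always `some`;
-- `.getD []` only unwraps that option.
def define_topic (body : String) : String :=
  let words := (PySem.Str.split? body " ").getD []
  let wordCounts : PySem.Dict String Int :=
    words.foldl (fun d w => d.modify w 0 (· + 1)) PySem.Dict.empty
  let trump_count : Int :=
    wordCounts.getD "Trump" 0 + wordCounts.getD "president" 0 + wordCounts.getD "President" 0 +
    wordCounts.getD "Pence" 0 + wordCounts.getD "Mike" 0 + wordCounts.getD "GOP" 0 +
    wordCounts.getD "Republican" 0 + wordCounts.getD "Republicans" 0 + wordCounts.getD "Donald" 0 +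
    wordCounts.getD "Mitch" 0 + wordCounts.getD "McConnell" 0 + wordCounts.getD "right" 0 +
    wordCounts.getD "Barrett" 0
  let biden_count : Int :=
    wordCounts.getD "Biden" 0 + wordCounts.getD "Kamala" 0 + wordCounts.getD "Vice President" 0 +
    wordCounts.getD "Joe" 0 + wordCounts.getD "Harris" 0 + wordCounts.getD "DNC" 0 +
    wordCounts.getD "Democrat" 0 + wordCounts.getD "Democrats" 0 + wordCounts.getD "Barack" 0 +
    wordCounts.getD "Obama" 0 + wordCounts.getD "Nancy" 0 + wordCounts.getD "Pelosi" 0 +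
    wordCounts.getD "left" 0 + wordCounts.getD "Schumer" 0 + wordCounts.getD "Pete" 0 +
    wordCounts.getD "Buttigieg" 0
  if trump_count > biden_count then "Trump"
  else if biden_count > trump_count then "Biden"
  else "Undefined"

-- ===== PORT B =====
def trumpWords : PySem.Set String :=
  PySem.Set.ofList ["Trump", "president", "President", "Pence", "Mike", "GOP",
                    "Republican", "Republicans", "Donald", "Mitch", "McConnell",
                    "right", "Barrett"]

def bidenWords : PySem.Set String :=
  PySem.Set.ofList ["Biden", "Kamala", "Vice President", "Joe", "Harris", "DNC",
                    "Democrat", "Democrats", "Barack", "Obama", "Nancy", "Pelosi",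
                    "left", "Schumer", "Pete", "Buttigieg"]

-- body.split(' ') as in port A: the separator " " is nonempty, so `.getD []` only unwraps `some`
def define_topic_alt (body : String) : String :=
  let counts : Int × Int :=
    ((PySem.Str.split? body " ").getD []).foldl
      (fun (acc : Int × Int) w =>
        if PySem.Set.contains trumpWords w then (acc.1 + 1, acc.2)
        else if PySem.Set.contains bidenWords w then (acc.1, acc.2 + 1)
        else acc)
      (0, 0)
  if counts.1 > counts.2 then "Trump"
  else if counts.2 > counts.1 then "Biden"
  else "Undefined"

-- ===== PRECONDITION & SPEC =====
def Spec_define_topic (body : String) (out : String) : Prop := out = define_topic_alt body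
instance (body : String) (out : String) : Decidable (Spec_define_topic body out) := by unfold Spec_define_topic; infer_instance

-- ===== CLAIM (what is proved, stated in full; the proofs are below) =====
def Claim_equal_define_topic : Prop := ∀ (body : String), Dom_define_topic body → Spec_define_topic body (define_topic body)

-- ===== LEMMAS AND PROOFS =====

-- the two keyword lists, as plain lists
def tks : List String :=
  ["Trump", "president", "President", "Pence", "Mike", "GOP", "Republican",
   "Republicans", "Donald", "Mitch", "McConnell", "right", "Barrett"]

def bks : List String :=
  ["Biden", "Kamala", "Vice President", "Joe", "Harris", "DNC", "Democrat",
   "Democrats", "Barack", "Obama", "Nancy", "Pelosi", "left", "Schumer",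
   "Pete", "Buttigieg"]

theorem trumpWords_eq : trumpWords = tks := by decide

theorem bidenWords_eq : bidenWords = bks := by decide

-- the two keyword lists are disjoint
theorem pv_disj (w : String) (ht : tks.contains w = true) : bks.contains w = false := by
  rw [List.contains_eq_mem, decide_eq_true_eq] at ht
  rw [List.contains_eq_mem, decide_eq_false_iff_not]
  have hd : ∀ x ∈ tks, x ∉ bks := by decide
  exact hd w ht

-- sum over a duplicate-free key list of the indicator "this key equals w" = "w is one of the keys"
theorem pv_sum_indicator (ks : List String) (w : String) (hnd : ks.Nodup) :
    ((ks.map (fun k => if k = w then (1 : Int) else 0)).sum) =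
      if w ∈ ks then 1 else 0 := by
  induction ks with
  | nil => simp
  | cons k ks ih =>
    rcases List.nodup_cons.mp hnd with ⟨hk, hnd'⟩
    by_cases hw : k = w
    · subst hw
      have hz : ((ks.map (fun k' => if k' = k then (1 : Int) else 0)).sum) = 0 := by
        rw [ih hnd']
        simp [hk]
      simp [hz]
    · have h2 : ¬ w = k := fun h => hw h.symm
      simp only [List.map_cons, List.sum_cons, if_neg hw, ih hnd', List.mem_cons]
      simp [h2]

-- sum of per-key multiplicities over a duplicate-free key list = count of words that are a key
theorem pv_sum_counts (ks : List String) (hnd : ks.Nodup) (ws : List String) :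
    ((ks.map (fun k => (ws.count k : Int))).sum) =
      (ws.countP (fun w => ks.contains w) : Int) := by
  induction ws with
  | nil => simp
  | cons w ws ih =>
    have hcnt : ∀ k : String, (((w :: ws).count k : Nat) : Int) =
        (ws.count k : Int) + (if k = w then (1 : Int) else 0) := by
      intro k
      rw [List.count_cons]
      by_cases h : k = w
      · simp [h]
      · have h2 : ¬ w = k := fun hh => h hh.symm
        simp [h, h2]
    calc ((ks.map (fun k => ((w :: ws).count k : Int))).sum)
        = ((ks.map (fun k => (ws.count k : Int) + (if k = w then (1 : Int) else 0))).sum) := by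
          congr 1; exact List.map_congr_left (fun k _ => hcnt k)
      _ = ((ks.map (fun k => (ws.count k : Int))).sum) +
            ((ks.map (fun k => if k = w then (1 : Int) else 0)).sum) := by
          simp [← List.sum_map_add]
      _ = (ws.countP (fun w => ks.contains w) : Int) + (if w ∈ ks then 1 else 0) := by
          rw [ih, pv_sum_indicator ks w hnd]
      _ = ((w :: ws).countP (fun w => ks.contains w) : Int) := by
          rw [List.countP_cons]
          by_cases h : w ∈ ks <;>
            simp [h, List.contains_eq_mem]

-- A's literal 13-term sum, as one countP
theorem pv_sumT (ws : List String) :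
    (ws.count "Trump" : Int) + ws.count "president" + ws.count "President" +
    ws.count "Pence" + ws.count "Mike" + ws.count "GOP" + ws.count "Republican" +
    ws.count "Republicans" + ws.count "Donald" + ws.count "Mitch" +
    ws.count "McConnell" + ws.count "right" + ws.count "Barrett" =
      (ws.countP (fun w => tks.contains w) : Int) := by
  have h := pv_sum_counts tks (by decide) ws
  simp only [tks, List.map_cons, List.map_nil, List.sum_cons, List.sum_nil, add_zero] at h ⊢
  omega

-- A's literal 16-term sum, as one countP
theorem pv_sumB (ws : List String) :
    (ws.count "Biden" : Int) + ws.count "Kamala" + ws.count "Vice President" +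
    ws.count "Joe" + ws.count "Harris" + ws.count "DNC" + ws.count "Democrat" +
    ws.count "Democrats" + ws.count "Barack" + ws.count "Obama" + ws.count "Nancy" +
    ws.count "Pelosi" + ws.count "left" + ws.count "Schumer" + ws.count "Pete" +
    ws.count "Buttigieg" =
      (ws.countP (fun w => bks.contains w) : Int) := by
  have h := pv_sum_counts bks (by decide) ws
  simp only [bks, List.map_cons, List.map_nil, List.sum_cons, List.sum_nil, add_zero] at h ⊢
  omega

-- B's loop keeps exactly the two countP values
theorem pv_loopB (ws : List String) (t b : Int) :
    ws.foldl
      (fun (acc : Int × Int) w =>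
        if PySem.Set.contains trumpWords w then (acc.1 + 1, acc.2)
        else if PySem.Set.contains bidenWords w then (acc.1, acc.2 + 1)
        else acc)
      (t, b) =
    (t + (ws.countP (fun w => tks.contains w) : Int),
     b + (ws.countP (fun w => bks.contains w) : Int)) := by
  induction ws generalizing t b with
  | nil => simp
  | cons w ws ih =>
    have hT : PySem.Set.contains trumpWords w = tks.contains w := by
      rw [trumpWords_eq]; rfl
    have hB : PySem.Set.contains bidenWords w = bks.contains w := by
      rw [bidenWords_eq]; rfl
    simp only [List.foldl_cons, hT, hB, List.countP_cons]
    by_cases ht : tks.contains w = true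
    · have hb : bks.contains w = false := pv_disj w ht
      simp only [ht, if_true, ih, hb]
      simp
      omega
    · simp only [ht, Bool.false_eq_true, if_false]
      by_cases hb : bks.contains w = true
      · simp only [hb, if_true, ih]
        simp
        omega
      · simp only [hb, Bool.false_eq_true, if_false, ih]
        simp

theorem define_topic_eq (body : String) : define_topic body = define_topic_alt body := by
  unfold define_topic define_topic_alt
  have hget : ∀ k : String,
      (((PySem.Str.split? body " ").getD []).foldl (fun d w => d.modify w 0 (· + 1))
          PySem.Dict.empty).getD k 0 =
        (((PySem.Str.split? body " ").getD []).count k : Int) := by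
    intro k
    rw [PySem.Dict.getD_foldl_modify_add_one]
    simp [PySem.Dict.empty, PySem.Dict.getD, PySem.Dict.get?]
  simp only [hget, pv_loopB, pv_sumT, pv_sumB, zero_add]

-- ===== VERDICT (by name: the statement is the Claim_ definition above) =====
theorem define_topic_spec : Claim_equal_define_topic := by
  intro body _
  unfold Spec_define_topic
  exact define_topic_eq body
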